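-- pv_equiv track=rewrite | github.com/IgnisTynka/matura-exercises | lekcje/szyfry/column_cipher.py | encrytion_v2
-- ===== SOURCE A (Python) =====
-- def tab_size(text):
--     d = len(text)
--     n = 1
--     while (n * n < d):
--         n += 1
--     return n
--
-- def encrytion_v2(text):
--     n = tab_size(text)
--     pom = tab = [[0 for col in range(n)] for row in range(n)]
--     l = 0
--     for i in range(n):
--         for j in range(n):
--             if (l < len(text)):
--                 pom[i][j] = text[l]
--                 l += 1
--             else:
--                 pom[i][j] = "_"
--     szyfr = ""
--     for i in range(n):
--         for j in range(n):
--             if pom[j][i] != "_":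
--                 szyfr += pom[j][i]
--     return szyfr
-- ===== SOURCE B (Python) =====
-- def tab_size(text):
--     d = len(text)
--     n = 1
--     while (n * n < d):
--         n += 1
--     return n
--
-- def encrytion_v2(text):
--     # No grid: read columns by arithmetic indexing into text directly.
--     # The cipher drops the padding character '_', so pad positions
--     # (index >= len(text)) and literal '_' characters are skipped.
--     n = tab_size(text)
--     return ''.join(text[j * n + i]
--                    for i in range(n) for j in range(n)
--                    if j * n + i < len(text) and text[j * n + i] != '_')
-- ===== Notes on version B (the rewrite author's own statement) =====
-- stated objective: simpler
-- what changed: B removes the materialized n-by-n padded grid and its separate fill and scan passes, reading column-wise directly from the text by the arithmetic index j*n+i in one comprehension (skipping pad positions and the pad character '_').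
import Mathlib
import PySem

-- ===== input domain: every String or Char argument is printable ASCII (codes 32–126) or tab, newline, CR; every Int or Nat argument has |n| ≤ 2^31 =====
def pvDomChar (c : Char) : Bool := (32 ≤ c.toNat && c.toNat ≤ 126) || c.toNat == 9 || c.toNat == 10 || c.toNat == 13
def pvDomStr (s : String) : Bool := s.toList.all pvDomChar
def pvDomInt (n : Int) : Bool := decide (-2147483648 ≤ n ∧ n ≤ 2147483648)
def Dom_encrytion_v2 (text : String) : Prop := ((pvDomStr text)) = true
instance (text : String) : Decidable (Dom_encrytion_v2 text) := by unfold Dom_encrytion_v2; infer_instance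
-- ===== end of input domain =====

-- B replaces A's materialized n×n padded grid (separate fill and scan passes) by direct
-- column-wise arithmetic indexing into the text in a single comprehension; objective: simpler.

-- ===== PORT A =====
-- tab_size: while (n*n < d): n += 1   (shared helper of both Python versions)
def tabSizeLoop (d n : Nat) : Nat :=
  if n * n < d then tabSizeLoop d (n + 1) else n
termination_by d - n
decreasing_by
  have hle : n ≤ n * n := by nlinarith
  omega

def tabSize (text : String) : Nat := tabSizeLoop text.toList.length 1

def encrytion_v2 (text : String) : String :=
  let cs := text.toList
  let n := tabSize text
  -- fill pass: pom[i][j] = text[l] (l advancing) or '_' padding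
  let fill := (List.range n).foldl (fun (acc : List (List Char) × Nat) _i =>
      let inner := (List.range n).foldl (fun (racc : List Char × Nat) _j =>
          if racc.2 < cs.length then (racc.1 ++ [cs.getD racc.2 '_'], racc.2 + 1)
          else (racc.1 ++ ['_'], racc.2)) ([], acc.2)
      (acc.1 ++ [inner.1], inner.2)) ([], 0)
  let pom := fill.1
  -- scan pass: column-wise, skipping '_'
  let szyfr := (List.range n).foldl (fun s i =>
      (List.range n).foldl (fun s j =>
          if (pom.getD j []).getD i '_' != '_' then s ++ [(pom.getD j []).getD i '_'] else s) s) []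
  String.mk szyfr

-- ===== PORT B =====
def encrytion_v2_alt (text : String) : String :=
  let cs := text.toList
  let n := tabSize text
  String.mk ((List.range n).flatMap (fun i =>
    (List.range n).filterMap (fun j =>
      match cs[j * n + i]? with
      | some c => if c != '_' then some c else none
      | none => none)))

-- ===== PRECONDITION & SPEC =====
def Spec_encrytion_v2 (text : String) (out : String) : Prop := out = encrytion_v2_alt text
instance (text : String) (out : String) : Decidable (Spec_encrytion_v2 text out) := by unfold Spec_encrytion_v2; infer_instance

-- ===== CLAIM (what is proved, stated in full; the proofs are below) =====
def Claim_equal_encrytion_v2 : Prop := ∀ (text : String), Dom_encrytion_v2 text → Spec_encrytion_v2 text (encrytion_v2 text)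

-- ===== LEMMAS AND PROOFS =====

-- the value A's fill pass stores at linear (row-major) position k of the grid
def pvCell (cs : List Char) (k : Nat) : Char :=
  if k < cs.length then cs.getD k '_' else '_'

theorem pv_inner_fill (cs : List Char) (n l0 : Nat) (r0 : List Char) (h : l0 ≤ cs.length) :
    (List.range n).foldl (fun (racc : List Char × Nat) _j =>
        if racc.2 < cs.length then (racc.1 ++ [cs.getD racc.2 '_'], racc.2 + 1)
        else (racc.1 ++ ['_'], racc.2)) (r0, l0)
    = (r0 ++ (List.range n).map (fun j => pvCell cs (l0 + j)), min (l0 + n) cs.length) := by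
  induction n with
  | zero => simp [Nat.min_eq_left h]
  | succ m ih =>
      rw [List.range_succ, List.foldl_append, ih, List.foldl_cons, List.foldl_nil]
      by_cases hc : l0 + m < cs.length
      · rw [Nat.min_eq_left (Nat.le_of_lt hc), if_pos hc]
        simp only [Prod.mk.injEq]
        refine ⟨?_, by omega⟩
        simp [pvCell, hc, List.append_assoc]
      · rw [Nat.min_eq_right (by omega), if_neg (by omega)]
        simp only [Prod.mk.injEq]
        refine ⟨?_, by omega⟩
        simp [pvCell, hc, List.append_assoc]

theorem pv_outer_fill (cs : List Char) (n m : Nat) :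
    (List.range m).foldl (fun (acc : List (List Char) × Nat) _i =>
        let inner := (List.range n).foldl (fun (racc : List Char × Nat) _j =>
            if racc.2 < cs.length then (racc.1 ++ [cs.getD racc.2 '_'], racc.2 + 1)
            else (racc.1 ++ ['_'], racc.2)) ([], acc.2)
        (acc.1 ++ [inner.1], inner.2)) ([], 0)
    = ((List.range m).map (fun i => (List.range n).map (fun j => pvCell cs (i * n + j))),
        min (m * n) cs.length) := by
  induction m with
  | zero => simp
  | succ p ih =>
      rw [List.range_succ, List.foldl_append, ih, List.foldl_cons, List.foldl_nil]
      simp only []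
      rw [pv_inner_fill cs n _ _ (by omega)]
      simp only [List.nil_append, Prod.mk.injEq]
      constructor
      · rw [List.map_append, List.map_cons, List.map_nil]
        congr 2
        apply List.map_congr_left
        intro j _
        unfold pvCell
        by_cases hd : p * n ≤ cs.length
        · rw [Nat.min_eq_left hd]
        · rw [Nat.min_eq_right (by omega), if_neg (by omega), if_neg (by omega)]
      · have hpn : (p + 1) * n = p * n + n := by ring
        omega

theorem pv_getD_map_range {α : Type} (f : Nat → α) (n j : Nat) (d : α) (h : j < n) :
    ((List.range n).map f).getD j d = f j := by
  rw [List.getD_eq_getElem _ d (by simpa using h)]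
  simp

theorem pv_filter_map (g : Nat → Char) (h : Nat → Option Char)
    (hpt : ∀ j, h j = if g j != '_' then some (g j) else none) (l : List Nat) :
    (l.filter (fun j => g j != '_')).map g = l.filterMap h := by
  induction l with
  | nil => simp
  | cons a t ih =>
      rw [List.filter_cons, List.filterMap_cons, hpt a]
      by_cases hg : (g a != '_') = true <;> simp [hg, ih]

theorem encrytion_v2_eq_alt (text : String) : encrytion_v2 text = encrytion_v2_alt text := by
  unfold encrytion_v2 encrytion_v2_alt
  simp only []
  rw [pv_outer_fill text.toList (tabSize text) (tabSize text)]
  simp only []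
  congr 1
  have hcell : ∀ i j : Nat, j < tabSize text → i < tabSize text →
      ((((List.range (tabSize text)).map
          (fun i => (List.range (tabSize text)).map (fun j => pvCell text.toList (i * tabSize text + j)))).getD j []).getD i '_')
        = pvCell text.toList (j * tabSize text + i) := by
    intro i j hj hi
    rw [pv_getD_map_range _ _ _ _ hj, pv_getD_map_range _ _ _ _ hi]
  have hpt : ∀ i : Nat,
      ∀ j : Nat, (match text.toList[j * tabSize text + i]? with
        | some c => if c != '_' then some c else none
        | none => (none : Option Char))
        = if pvCell text.toList (j * tabSize text + i) != '_' then some (pvCell text.toList (j * tabSize text + i)) else none := by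
    intro i j
    unfold pvCell
    by_cases hk : j * tabSize text + i < text.toList.length
    · rw [if_pos hk, List.getElem?_eq_getElem hk, List.getD_eq_getElem text.toList '_' hk]
    · rw [if_neg hk, List.getElem?_eq_none (by omega)]
      simp
  have hinner : ∀ (s : List Char) (i : Nat), i < tabSize text →
      (List.range (tabSize text)).foldl (fun s j =>
          if (((List.range (tabSize text)).map
              (fun i => (List.range (tabSize text)).map (fun j => pvCell text.toList (i * tabSize text + j)))).getD j []).getD i '_' != '_'
          then s ++ [(((List.range (tabSize text)).map
              (fun i => (List.range (tabSize text)).map (fun j => pvCell text.toList (i * tabSize text + j)))).getD j []).getD i '_']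
          else s) s
      = s ++ (List.range (tabSize text)).filterMap (fun j =>
          match text.toList[j * tabSize text + i]? with
          | some c => if c != '_' then some c else none
          | none => none) := by
    intro s i hi
    rw [← pv_filter_map (fun j => pvCell text.toList (j * tabSize text + i)) _ (hpt i),
      ← PySem.List.foldl_append_if]
    apply PySem.List.foldl_congr_mem
    intro acc j hj
    rw [hcell i j (List.mem_range.mp hj) hi]
  have hmain : ∀ (m : Nat), m ≤ tabSize text →
      (List.range m).foldl (fun s i =>
        (List.range (tabSize text)).foldl (fun s j =>
          if (((List.range (tabSize text)).map
              (fun i => (List.range (tabSize text)).map (fun j => pvCell text.toList (i * tabSize text + j)))).getD j []).getD i '_' != '_'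
          then s ++ [(((List.range (tabSize text)).map
              (fun i => (List.range (tabSize text)).map (fun j => pvCell text.toList (i * tabSize text + j)))).getD j []).getD i '_']
          else s) s) []
      = (List.range m).flatMap (fun i =>
          (List.range (tabSize text)).filterMap (fun j =>
            match text.toList[j * tabSize text + i]? with
            | some c => if c != '_' then some c else none
            | none => none)) := by
    intro m hm
    induction m with
    | zero => simp
    | succ p ih =>
        rw [List.range_succ, List.foldl_append, List.foldl_cons, List.foldl_nil,
          ih (by omega), hinner _ p (by omega)]
        simp
  exact hmain (tabSize text) le_rfl

-- ===== VERDICT (by name: the statement is the Claim_ definition above) =====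
theorem encrytion_v2_spec : Claim_equal_encrytion_v2 := by
  intro text _
  unfold Spec_encrytion_v2
  exact encrytion_v2_eq_alt text
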